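-- pv_equiv track=rewrite | github.com/schmidtfrk/master-thesis-scripts | bsm_lib.py | erasure_color
-- ===== SOURCE A (Python) =====
-- import itertools
--
-- def create_logicals(stabilizer,log):
--     """ Creates all logical operators if one represantive is given. """
--     liste=list(span_generator_mod2(stabilizer))
--     if liste!=[]:
--         for i in liste:
--             for j in range(len(i)):
--                 i[j]+=log[j]
--                 i[j]%=2
--     else:
--         liste.append(log)
--     return liste
--
-- def create_erasure_patterns(numberofqubits):
--     """ Creates a list of all possible erasure patterns with numberofqubits
--         qubits, which is more efficient than
--         list(span_generator_mod2(ones(numberofqubits)))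
--     """
--     y=[[int(x) for x in list('{0:0b}'.format(i))]for i in range(2**numberofqubits)]
--     length=len(y[-1])
--     for i in y:
--         while len(i)<length:
--             i.insert(0,0)
--     return y
--
-- def span_generator_mod2(liste):
--     """ Takes a list of vectors and returns all linearcombinations(modulo 2)
--
--         Input:
--         liste: list of lists of numbers
--
--         Output:
--         generator of Lists of numbers
--     """
--     if liste==[]:
--         return liste
--     n = len(liste[0])
--     transpose = list(zip(*liste))
--     coefficients = itertools.product(range(2), repeat=len(liste))
--     for coeff in coefficients:
--         yield [sum((a * c) for a, c in zip(transpose[i], coeff)) % 2 for i in range(n)]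
--
-- def erasure_color(xstabilizer,xlog):
--     """ Counts uncorrectable losses.
--         It assumes a [n,1,d]-CSS(C_X,C_X)-code.
--
--         Input:
--         xstablizer: list of lists of the support of the stabilizer
--                     generators (0 ist qubit not in support ,1 otherwise)
--         xlog: list of the support of one representative of logical operators
--
--         Output:
--         dummy: List of integers counting uncorrectable errors
--     """
--     xlogical=create_logicals(xstabilizer,xlog)
--     n=len(xstabilizer[0])
--     dummy=[0]*(n+1)
--     xerrors=[]
--     errors=create_erasure_patterns(n)
--     for i in range(len(errors)):
--         breakvar=0
--         for j in range(len(xlogical)):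
--             breakvarx=0
--             for k in range(n):
--                 if 1==xlogical[j][k]:
--                     if 1!=errors[i][k]:
--                         breakvarx=1
--             if 0==breakvarx:
--                 xerrors.append(errors[i])
--                 breakvar=1
--                 break
--     for i in range(len(xerrors)):
--         dummy[sum(xerrors[i])]+=1
--     return dummy
-- ===== SOURCE B (Python) =====
-- def _popcount(e):
--     c = 0
--     while e:
--         c += e & 1
--         e >>= 1
--     return c
--
-- def erasure_color(xstabilizer, xlog):
--     """Same count, via bitmasks: build the set of logical-support masks
--     (xor-span of the stabilizer masks, shifted by the logical mask),
--     propagate subset containment with a sum-over-subsets (zeta) transform,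
--     then bin the surviving erasure masks by popcount."""
--     n = len(xstabilizer[0])
--     mask = lambda row: sum((row[k] % 2) << k for k in range(n))
--     logmask = mask(xlog)
--     span = {0}
--     for row in xstabilizer:
--         m = mask(row)
--         span = span | {s ^ m for s in span}
--     marked = {s ^ logmask for s in span}
--     f = [1 if e in marked else 0 for e in range(1 << n)]
--     for b in range(n):
--         bit = 1 << b
--         f = [max(f[e], f[e ^ bit]) if e & bit else f[e] for e in range(1 << n)]
--     return [sum(f[e] for e in range(1 << n) if _popcount(e) == w) for w in range(n + 1)]
-- ===== Notes on version B (the rewrite author's own statement) =====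
-- stated objective: faster
-- what changed: B replaces A's triple loop (all 2^n binary-string erasure patterns tested entrywise against all 2^s logical vectors, which are materialised by re-spanning the stabilizer) with bitmask arithmetic: logical supports become an xor-span set of integer masks, subset containment is propagated over all masks by a sum-over-subsets (zeta) transform, and surviving masks are binned by popcount.
import Mathlib
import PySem

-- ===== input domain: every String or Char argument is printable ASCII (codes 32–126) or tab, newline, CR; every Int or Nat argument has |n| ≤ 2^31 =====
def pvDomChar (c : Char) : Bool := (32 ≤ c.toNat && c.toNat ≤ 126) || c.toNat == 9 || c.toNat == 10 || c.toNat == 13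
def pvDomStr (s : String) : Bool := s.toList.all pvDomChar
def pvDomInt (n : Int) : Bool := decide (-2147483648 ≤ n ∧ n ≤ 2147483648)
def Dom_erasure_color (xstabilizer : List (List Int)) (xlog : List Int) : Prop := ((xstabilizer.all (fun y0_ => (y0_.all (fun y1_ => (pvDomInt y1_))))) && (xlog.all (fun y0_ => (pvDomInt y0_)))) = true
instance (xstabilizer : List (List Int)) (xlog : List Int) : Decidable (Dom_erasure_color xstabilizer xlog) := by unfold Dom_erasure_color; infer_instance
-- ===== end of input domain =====

-- B replaces A's triple loop over all 2^n erasure patterns × all 2^s logicals × n qubits by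
-- bitmask logical supports and a sum-over-subsets (zeta) transform, then bins masks by popcount.

-- ===== PORT A =====
-- itertools.product(range(2), repeat=s): first factor most significant
def pvProd01 : Nat → List (List Int)
  | 0 => [[]]
  | s+1 => ([0, 1] : List Int).flatMap (fun x => (pvProd01 s).map (fun c => x :: c))

-- list(zip(*liste)): column i for i < min row length (exact: column i lists entry i of every row)
def pvTranspose (l : List (List Int)) : List (List Int) :=
  let m := ((l.map List.length).min?).getD 0
  (List.range m).map (fun i => l.map (fun r => r.getD i 0))

def pvSpanGen (liste : List (List Int)) : List (List Int) :=
  if liste = [] then []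
  else
    let n := (liste.headI).length
    let transpose := pvTranspose liste
    (pvProd01 liste.length).map (fun coeff =>
      (List.range n).map (fun i =>
        PySem.Int.mod ((((transpose.getD i []).zip coeff).map (fun p => p.1 * p.2)).sum) 2))

-- in-place 'i[j] = (i[j]+log[j]) % 2' loop as a map (each entry is written once, from old values)
def pvCreateLogicals (stabilizer : List (List Int)) (log : List Int) : List (List Int) :=
  let liste := pvSpanGen stabilizer
  if liste = [] then [log]
  else liste.map (fun i => (List.range i.length).map (fun j =>
    PySem.Int.mod (i.getD j 0 + log.getD j 0) 2))

-- create_erasure_patterns: '{0:0b}'.format(i) digit lists ('int(x)' on a digit char is code-48),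
-- left-padded with zeros to the length of the last entry
def pvPatterns (n : Nat) : List (List Int) :=
  let y := (List.range (2^n)).map (fun (i : Nat) =>
    (PySem.Int.toBinChars (i : Int)).map (fun c => ((c.toNat : Int) - 48)))
  let len := (y.getLast?.getD []).length
  y.map (fun i => List.replicate (len - i.length) (0:Int) ++ i)

-- the inner k-loop computing breakvarx
def pvBreakvarx (L e : List Int) (n : Nat) : Int :=
  (List.range n).foldl (fun bx k =>
    if (1:Int) = L.getD k 0 then (if (1:Int) ≠ e.getD k 0 then 1 else bx) else bx) 0

-- the j-loop: append errors[i] at the first fitting logical, then break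
def pvLoopJ (ls : List (List Int)) (e : List Int) (n : Nat) (acc : List (List Int)) : List (List Int) :=
  match ls with
  | [] => acc
  | L :: rest => if pvBreakvarx L e n = 0 then acc ++ [e] else pvLoopJ rest e n acc

def erasure_color (xstabilizer : List (List Int)) (xlog : List Int) : List Int :=
  let xlogical := pvCreateLogicals xstabilizer xlog
  let n := (xstabilizer.headI).length
  let dummy := List.replicate (n+1) (0:Int)
  let errors := pvPatterns n
  let xerrors := errors.foldl (fun acc e => pvLoopJ xlogical e n acc) []
  -- dummy[sum(e)] += 1 (pattern entries are 0/1, so the index is a Nat in range)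
  xerrors.foldl (fun d e => d.set (e.sum).toNat (d.getD (e.sum).toNat 0 + 1)) dummy

-- ===== PORT B =====
def pvPopcount (e : Nat) : Nat :=
  if e = 0 then 0 else (e % 2) + pvPopcount (e / 2)
decreasing_by exact Nat.div_lt_self (Nat.pos_of_ne_zero (by assumption)) (by omega)

def pvMask (n : Nat) (row : List Int) : Int :=
  ((List.range n).map (fun k => (PySem.Int.mod (row.getD k 0) 2) <<< k)).sum

def erasure_color_alt (xstabilizer : List (List Int)) (xlog : List Int) : List Int :=
  let n := (xstabilizer.headI).length
  let logmask := pvMask n xlog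
  let span := xstabilizer.foldl
    (fun (span : PySem.Set Int) row =>
      let m := pvMask n row
      PySem.Set.union span (PySem.Set.ofList (span.map (fun s => PySem.Int.bxor s m))))
    (PySem.Set.ofList [0])
  let marked : PySem.Set Int := PySem.Set.ofList (span.map (fun s => PySem.Int.bxor s logmask))
  let f0 := (List.range (2^n)).map (fun (e : Nat) => if PySem.Set.contains marked (e : Int) then (1:Int) else 0)
  let f := (List.range n).foldl
    (fun f b => (List.range (2^n)).map (fun e =>
       if e &&& (1 <<< b) ≠ 0 then max (f.getD e (0:Int)) (f.getD (e ^^^ (1 <<< b)) (0:Int)) else f.getD e (0:Int))) f0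
  (List.range (n+1)).map (fun w =>
    (((List.range (2^n)).filter (fun e => pvPopcount e == w)).map (fun e => f.getD e (0:Int))).sum)

-- ===== PRECONDITION & SPEC =====
-- A raises IndexError when the stabilizer list is empty, when some row is shorter than the first
-- row (zip(*liste) truncates below n), or when xlog is shorter than the first row; Pre_ excludes
-- exactly those inputs.
def Pre_erasure_color (xstabilizer : List (List Int)) (xlog : List Int) : Prop :=
  xstabilizer ≠ [] ∧ (∀ r ∈ xstabilizer, (xstabilizer.headI).length ≤ r.length) ∧
    (xstabilizer.headI).length ≤ xlog.length
instance (xstabilizer : List (List Int)) (xlog : List Int) : Decidable (Pre_erasure_color xstabilizer xlog) := by unfold Pre_erasure_color; infer_instance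
def pvWitness_erasure_color : List (List Int) × List Int := ([[1,1,0],[0,1,1]], [1,1,1])
def Spec_erasure_color (xstabilizer : List (List Int)) (xlog : List Int) (out : List Int) : Prop := out = erasure_color_alt xstabilizer xlog
instance (xstabilizer : List (List Int)) (xlog : List Int) (out : List Int) : Decidable (Spec_erasure_color xstabilizer xlog out) := by unfold Spec_erasure_color; infer_instance

-- ===== CLAIM (what is proved, stated in full; the proofs are below) =====
def Claim_equal_erasure_color : Prop := ∀ (xstabilizer : List (List Int)) (xlog : List Int), Dom_erasure_color xstabilizer xlog → Pre_erasure_color xstabilizer xlog → Spec_erasure_color xstabilizer xlog (erasure_color xstabilizer xlog)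

-- ===== LEMMAS AND PROOFS =====


def pvOfBits : List Bool → Nat
  | [] => 0
  | b :: bs => (if b then 1 else 0) + 2 * pvOfBits bs


theorem pvOfBits_testBit (l : List Bool) (k : Nat) :
    (pvOfBits l).testBit k = l.getD k false := by
  induction l generalizing k with
  | nil => simp [pvOfBits]
  | cons b bs ih =>
    cases k with
    | zero =>
      rw [Nat.testBit_zero]
      cases b <;> simp [pvOfBits] <;> omega
    | succ k =>
      rw [Nat.testBit_succ]
      have h2 : ((if b then 1 else 0) + 2 * pvOfBits bs) / 2 = pvOfBits bs := by cases b <;> simp <;> omega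
      simp only [pvOfBits, h2, ih]
      rfl

theorem pvOfBits_lt (l : List Bool) : pvOfBits l < 2 ^ l.length := by
  induction l with
  | nil => simp [pvOfBits]
  | cons b bs ih =>
    simp only [pvOfBits, List.length_cons, pow_succ]
    cases b <;> simp <;> omega

theorem pvPopcount_pvOfBits (l : List Bool) : pvPopcount (pvOfBits l) = l.countP id := by
  induction l with
  | nil => simp [pvOfBits, pvPopcount]
  | cons b bs ih =>
    rw [pvPopcount]
    by_cases h0 : pvOfBits (b :: bs) = 0
    · have hb : b = false ∧ pvOfBits bs = 0 := by
        cases b <;> simp [pvOfBits] at h0 ⊢ <;> omega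
      rw [if_pos h0]
      have := ih
      rw [hb.2, pvPopcount] at this
      simp only [List.countP_cons, hb.1]
      simp at this ⊢
      omega
    · rw [if_neg h0]
      have h1 : pvOfBits (b :: bs) % 2 = if b then 1 else 0 := by
        cases b <;> simp [pvOfBits] <;> omega
      have h2 : pvOfBits (b :: bs) / 2 = pvOfBits bs := by
        cases b <;> simp [pvOfBits] <;> omega
      rw [h1, h2, ih, List.countP_cons]
      cases b <;> simp [id] <;> omega
def pvRev (n i : Nat) : Nat := pvOfBits ((List.range n).map (fun k => Nat.testBit i (n-1-k)))

theorem pvRev_testBit (n i k : Nat) :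
    (pvRev n i).testBit k = if k < n then i.testBit (n-1-k) else false := by
  rw [pvRev, pvOfBits_testBit]
  by_cases h : k < n
  · rw [if_pos h, PySem.List.getD_map_range _ _ _ _ h]
  · rw [if_neg h, List.getD_eq_default]
    simp; omega

theorem pvRev_lt (n i : Nat) : pvRev n i < 2 ^ n := by
  have := pvOfBits_lt ((List.range n).map (fun k => Nat.testBit i (n-1-k)))
  simpa [pvRev] using this

theorem testBit_false_of_lt {x : Nat} {n j : Nat} (h : x < 2^n) (hj : n ≤ j) : x.testBit j = false := by
  exact Nat.testBit_lt_two_pow (lt_of_lt_of_le h (Nat.pow_le_pow_right (by omega) hj))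

theorem pvRev_invol (n i : Nat) (h : i < 2 ^ n) : pvRev n (pvRev n i) = i := by
  apply Nat.eq_of_testBit_eq
  intro k
  rw [pvRev_testBit]
  by_cases hk : k < n
  · rw [if_pos hk, pvRev_testBit, if_pos (by omega)]
    congr 1; omega
  · rw [if_neg hk, testBit_false_of_lt h (by omega)]

theorem countP_range_comp_rev (n : Nat) (p : Nat → Bool) :
    (List.range (2^n)).countP (fun i => p (pvRev n i)) = (List.range (2^n)).countP p := by
  have hperm : ((List.range (2^n)).map (pvRev n)).Perm (List.range (2^n)) := by
    apply List.Subperm.perm_of_length_le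
    · apply List.subperm_of_subset
      · apply List.Nodup.map_on
        · intro x hx y hy hxy
          have := pvRev_invol n x (by simpa using hx)
          have h2 := pvRev_invol n y (by simpa using hy)
          rw [← this, ← h2, hxy]
        · exact List.nodup_range
      · intro x hx
        simp only [List.mem_map, List.mem_range] at hx ⊢
        obtain ⟨i, _, rfl⟩ := hx
        exact pvRev_lt n i
    · simp
  calc (List.range (2^n)).countP (fun i => p (pvRev n i))
      = ((List.range (2^n)).map (pvRev n)).countP p := by rw [List.countP_map]; rfl
    _ = (List.range (2^n)).countP p := hperm.countP_eq p


def pvDigs (n : Nat) : List Char :=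
  if n < 2 then [Nat.digitChar n] else pvDigs (n/2) ++ [Nat.digitChar (n % 2)]
decreasing_by exact Nat.div_lt_self (by omega) (by omega)

theorem pvDigs_small {n : Nat} (h : n < 2) : pvDigs n = [Nat.digitChar n] := by
  rw [pvDigs, if_pos h]

theorem pvDigs_big {n : Nat} (h : ¬ n < 2) :
    pvDigs n = pvDigs (n/2) ++ [Nat.digitChar (n % 2)] := by
  conv_lhs => rw [pvDigs]
  rw [if_neg h]

theorem toDigitsCore_succ (fuel n : Nat) (ds : List Char) :
    Nat.toDigitsCore 2 (fuel+1) n ds =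
      if n / 2 = 0 then (n % 2).digitChar :: ds
      else Nat.toDigitsCore 2 fuel (n / 2) ((n % 2).digitChar :: ds) := by
  rw [Nat.toDigitsCore]

theorem toDigitsCore_eq (fuel n : Nat) (ds : List Char) (h : n < fuel) :
    Nat.toDigitsCore 2 fuel n ds = pvDigs n ++ ds := by
  induction fuel generalizing n ds with
  | zero => omega
  | succ fuel ih =>
    rw [toDigitsCore_succ]
    by_cases h2 : n / 2 = 0
    · rw [if_pos h2, pvDigs_small (by omega)]
      have : n % 2 = n := by omega
      rw [this]; rfl
    · rw [if_neg h2, ih _ _ (by omega), pvDigs_big (n := n) (by omega)]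
      simp

theorem toDigits_eq (n : Nat) : Nat.toDigits 2 n = pvDigs n := by
  have := toDigitsCore_eq (n+1) n [] (by omega)
  simpa [Nat.toDigits] using this

def pvCharVal (c : Char) : Int := (c.toNat : Int) - 48

theorem pvDigs_lt (i : Nat) : i < 2 ^ (pvDigs i).length := by
  induction i using pvDigs.induct with
  | case1 n h => rw [pvDigs_small h]; simpa using h
  | case2 n h ih =>
    rw [pvDigs_big h]
    simp only [List.length_append, List.length_cons, List.length_nil, pow_succ]
    omega

theorem pvDigs_spec (i : Nat) : (pvDigs i).map pvCharVal
    = (List.range (pvDigs i).length).map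
        (fun k => if Nat.testBit i ((pvDigs i).length - 1 - k) then (1:Int) else 0) := by
  induction i using pvDigs.induct with
  | case1 n h =>
    rw [pvDigs_small h]
    interval_cases n <;> decide
  | case2 n h ih =>
    rw [pvDigs_big h]
    have hlen : (pvDigs (n/2) ++ [(n % 2).digitChar]).length = (pvDigs (n/2)).length + 1 := by simp
    rw [hlen, List.map_append, ih, List.range_succ, List.map_append]
    congr 1
    · apply List.map_congr_left
      intro k hk
      simp only [List.mem_range] at hk
      have h1 : (pvDigs (n/2)).length + 1 - 1 - k = ((pvDigs (n/2)).length - 1 - k) + 1 := by omega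
      rw [h1, Nat.testBit_succ]
    · have h2 : (pvDigs (n/2)).length + 1 - 1 - (pvDigs (n/2)).length = 0 := by omega
      simp only [List.map_cons, List.map_nil, h2, Nat.testBit_zero]
      have : n % 2 < 2 := by omega
      interval_cases h3 : n % 2 <;> simp [pvCharVal, h3, Nat.digitChar]

theorem pvDigs_len_le (i n : Nat) (h : i < 2^n) (hn : 1 ≤ n) : (pvDigs i).length ≤ n := by
  induction i using pvDigs.induct generalizing n with
  | case1 j hj => rw [pvDigs_small hj]; simpa using hn
  | case2 j hj ih =>
    rw [pvDigs_big hj]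
    simp only [List.length_append, List.length_cons, List.length_nil]
    have hn2 : 2 ≤ n := by
      by_contra hc
      have : n = 1 := by omega
      subst this; simp at h; omega
    have hj2 : j / 2 < 2^(n-1) := by
      have : 2^n = 2^(n-1) * 2 := by
        rw [← pow_succ]; congr 1; omega
      omega
    have := ih (n-1) hj2 (by omega)
    omega

theorem pvDigs_len_pow (n : Nat) (h : 1 ≤ n) : (pvDigs (2^n - 1)).length = n := by
  induction n with
  | zero => omega
  | succ n ih =>
    by_cases hn : n = 0
    · subst hn
      norm_num
      rw [pvDigs_small (by omega)]
      rfl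
    · have hge : 2 ≤ 2^n := by have := Nat.one_lt_two_pow_iff.mpr hn; omega
      have h2 : 2^(n+1) = 2*2^n := by ring
      rw [pvDigs_big (by omega)]
      have h3 : (2^(n+1) - 1) / 2 = 2^n - 1 := by omega
      rw [h3]
      simp [ih (by omega)]

theorem toBinChars_natCast (i : Nat) :
    PySem.Int.toBinChars (i : Int) = pvDigs i := by
  rw [PySem.Int.toBinChars]
  rw [if_neg (by omega)]
  simp [toDigits_eq]

def pvPatX (n i : Nat) : List Int :=
  if n = 0 then [0] else (List.range n).map (fun k => if Nat.testBit i (n-1-k) then (1:Int) else 0)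

theorem pvPatterns_eq (n : Nat) : pvPatterns n = (List.range (2^n)).map (pvPatX n) := by
  have hy : (List.range (2^n)).map (fun (i : Nat) =>
      (PySem.Int.toBinChars (i : Int)).map (fun c => ((c.toNat : Int) - 48)))
      = (List.range (2^n)).map (fun i => (pvDigs i).map pvCharVal) := by
    apply List.map_congr_left
    intro i _
    rw [toBinChars_natCast]; rfl
  have hpos : 0 < 2^n := Nat.two_pow_pos n
  have hlast : ((List.range (2^n)).map (fun i => (pvDigs i).map pvCharVal)).getLast?.getD []
      = (pvDigs (2^n - 1)).map pvCharVal := by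
    have : List.range (2^n) = List.range (2^n - 1) ++ [2^n - 1] := by
      have h1 : 2^n = (2^n - 1) + 1 := by omega
      rw [h1, List.range_succ]
      congr 1 <;> omega
    rw [this]
    simp
  have hlenlast : ((pvDigs (2^n - 1)).map pvCharVal).length = max n 1 := by
    rw [List.length_map]
    by_cases hn : n = 0
    · subst hn; norm_num; rw [pvDigs_small (by omega)]; rfl
    · rw [pvDigs_len_pow n (by omega)]; omega
  rw [pvPatterns]
  simp only [hy, hlast, hlenlast]
  rw [List.map_map]
  apply List.map_congr_left
  intro i hi
  simp only [List.mem_range] at hi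
  simp only [Function.comp]
  by_cases hn : n = 0
  · subst hn
    have : i = 0 := by simpa using hi
    subst this
    rw [pvDigs_small (by omega)]
    decide
  · have hmax : max n 1 = n := by omega
    rw [hmax, pvPatX, if_neg hn]
    have hle : (pvDigs i).length ≤ n := pvDigs_len_le i n hi (by omega)
    have hilt : i < 2 ^ (pvDigs i).length := pvDigs_lt i
    rw [pvDigs_spec i, List.length_map, List.length_range]
    have hsplit : List.range n = List.range (n - (pvDigs i).length)
        ++ (List.range (pvDigs i).length).map (fun k => (n - (pvDigs i).length) + k) := by
      have : n = (n - (pvDigs i).length) + (pvDigs i).length := by omega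
      conv_lhs => rw [this]
      exact List.range_add
    rw [hsplit, List.map_append]
    congr 1
    · symm
      rw [List.eq_replicate_iff]
      constructor
      · simp
      · intro b hb
        simp only [List.mem_map, List.mem_range] at hb
        obtain ⟨k, hk, rfl⟩ := hb
        rw [testBit_false_of_lt hilt (by omega)]
        rfl
    · rw [List.map_map]
      apply List.map_congr_left
      intro k hk
      simp only [List.mem_range] at hk
      simp only [Function.comp]
      have : n - 1 - (n - (pvDigs i).length + k) = (pvDigs i).length - 1 - k := by omega
      rw [this]

theorem pvPatX_sum (n i : Nat) :
    ((pvPatX n i).sum).toNat = pvPopcount (pvRev n i) := by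
  rw [pvRev, pvPopcount_pvOfBits, List.countP_map]
  by_cases hn : n = 0
  · subst hn; simp [pvPatX]
  · rw [pvPatX, if_neg hn]
    have : ((List.range n).map (fun k => if Nat.testBit i (n-1-k) then (1:Int) else 0)).sum
        = ((List.range n).countP (fun k => Nat.testBit i (n-1-k)) : Int) := by
      exact PySem.List.sum_map_ite_one_zero (fun k => Nat.testBit i (n-1-k)) (List.range n)
    rw [this]
    simp [Function.comp]

theorem pvPatX_sum_le (n i : Nat) : ((pvPatX n i).sum).toNat < n + 1 := by
  rw [pvPatX_sum, pvRev, pvPopcount_pvOfBits, List.countP_map]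
  calc ((List.range n).countP _) ≤ (List.range n).length := List.countP_le_length
    _ < n + 1 := by simp

theorem pvPatX_getD (n i k : Nat) (hk : k < n) :
    (pvPatX n i).getD k 0 = if Nat.testBit i (n-1-k) then (1:Int) else 0 := by
  rw [pvPatX, if_neg (by omega)]
  exact PySem.List.getD_map_range _ _ _ _ hk

theorem foldl_flag (l : List Nat) (p : Nat → Prop) [DecidablePred p] (b : Int) :
    l.foldl (fun bx k => if p k then 1 else bx) b = if ∃ k ∈ l, p k then 1 else b := by
  induction l generalizing b with
  | nil => simp
  | cons x xs ih =>
    simp only [List.foldl_cons, ih]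
    by_cases hex : ∃ k ∈ x :: xs, p k
    · rw [if_pos hex]
      by_cases hx : p x
      · rw [if_pos hx]; split_ifs <;> rfl
      · have hex2 : ∃ k ∈ xs, p k := by
          obtain ⟨k, hk, hpk⟩ := hex
          rcases List.mem_cons.mp hk with rfl | hk2
          · exact absurd hpk hx
          · exact ⟨k, hk2, hpk⟩
        rw [if_neg hx, if_pos hex2]
    · have hx : ¬ p x := fun hp => hex ⟨x, by simp, hp⟩
      have hex2 : ¬ ∃ k ∈ xs, p k := by
        rintro ⟨k, hk, hpk⟩; exact hex ⟨k, by simp [hk], hpk⟩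
      rw [if_neg hx, if_neg hex2, if_neg hex]

theorem pvBreakvarx_eq_zero (L e : List Int) (n : Nat) :
    pvBreakvarx L e n = 0 ↔ ∀ k < n, L.getD k 0 = 1 → e.getD k 0 = 1 := by
  have hcongr : pvBreakvarx L e n
      = (List.range n).foldl (fun bx k =>
      if ((1:Int) = L.getD k 0 ∧ (1:Int) ≠ e.getD k 0) then 1 else bx) 0 := by
    rw [pvBreakvarx]
    apply PySem.List.foldl_congr_mem
    intro acc x _
    split_ifs <;> first | rfl | tauto
  rw [hcongr, foldl_flag]
  split_ifs with h
  · constructor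
    · intro hc; exact absurd hc (by norm_num)
    · intro hall
      obtain ⟨k, hk, h1, h2⟩ := h
      simp only [List.mem_range] at hk
      exact absurd (hall k hk h1.symm) (fun he => h2 he.symm)
  · constructor
    · intro _ k hk hL
      by_contra hc
      exact h ⟨k, by simpa using hk, hL.symm, fun he => hc he.symm⟩
    · intro _; rfl

theorem pvLoopJ_eq (ls : List (List Int)) (e : List Int) (n : Nat) (acc : List (List Int)) :
    pvLoopJ ls e n acc = if ls.any (fun L => pvBreakvarx L e n == 0) then acc ++ [e] else acc := by
  induction ls with
  | nil => simp [pvLoopJ]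
  | cons L rest ih =>
    rw [pvLoopJ]
    by_cases h : pvBreakvarx L e n = 0
    · rw [if_pos h, if_pos (by simp [h])]
    · rw [if_neg h, ih]
      congr 1
      simp [h]

theorem incr_fold (l : List (List Int)) (d : List Int) (N : Nat) (hd : d.length = N)
    (h : ∀ e ∈ l, (e.sum).toNat < N) :
    l.foldl (fun d e => d.set (e.sum).toNat (d.getD (e.sum).toNat 0 + 1)) d
      = (List.range N).map (fun w => d.getD w 0 + (l.countP (fun e => (e.sum).toNat == w) : Int)) := by
  induction l generalizing d with
  | nil =>
    simp only [List.foldl_nil, List.countP_nil]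
    apply List.ext_getElem
    · simp [hd]
    · intro k h1 h2
      simp only [List.getElem_map, List.getElem_range]
      rw [List.getD_eq_getElem?_getD, List.getElem?_eq_getElem h1]
      simp
  | cons e rest ih =>
    simp only [List.foldl_cons]
    rw [ih _ (by simpa using hd) (fun x hx => h x (by simp [hx]))]
    apply List.map_congr_left
    intro w hw
    simp only [List.mem_range] at hw
    have hlt : (e.sum).toNat < d.length := by rw [hd]; exact h e (by simp)
    rw [List.getD_eq_getElem?_getD, List.getElem?_set, List.countP_cons]
    by_cases hew : (e.sum).toNat = w
    · rw [if_pos hew, if_pos hlt]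
      simp [hew]
      omega
    · rw [if_neg hew]
      have : (e.sum.toNat == w) = false := by simp [hew]
      rw [this]
      simp [List.getD_eq_getElem?_getD]

def pvBitI (x : Int) : Bool := decide (PySem.Int.mod x 2 = 1)
def pvNmask (n : Nat) (row : List Int) : Nat :=
  pvOfBits ((List.range n).map (fun k => pvBitI (row.getD k 0)))

theorem pvOfBits_concat (l : List Bool) (b : Bool) :
    pvOfBits (l ++ [b]) = pvOfBits l + (if b then 2^l.length else 0) := by
  induction l with
  | nil => cases b <;> simp [pvOfBits]
  | cons x xs ih =>
    simp only [List.cons_append, pvOfBits, ih, List.length_cons, pow_succ]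
    cases b <;> cases x <;> simp <;> ring

theorem pvMask_eq (n : Nat) (row : List Int) : pvMask n row = ((pvNmask n row : Nat) : Int) := by
  induction n with
  | zero => simp [pvMask, pvNmask, pvOfBits]
  | succ n ih =>
    rw [pvMask, List.range_succ, List.map_append, List.sum_append]
    rw [pvNmask, List.range_succ, List.map_append]
    simp only [List.map_cons, List.map_nil]
    rw [pvOfBits_concat]
    rw [← pvMask, ← pvNmask, ih]
    have hmod := PySem.Int.mod_nonneg (row.getD n 0) (show (0:Int) < 2 by omega)
    have hmod2 := PySem.Int.mod_lt (row.getD n 0) (show (0:Int) < 2 by omega)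
    have hlen : ((List.range n).map (fun k => pvBitI (row.getD k 0))).length = n := by simp
    rw [hlen]
    simp only [List.map_cons, List.map_nil, List.sum_cons, List.sum_nil, add_zero]
    rw [Int.shiftLeft_eq]
    by_cases hb : pvBitI (row.getD n 0)
    · have : PySem.Int.mod (row.getD n 0) 2 = 1 := by simpa [pvBitI] using hb
      rw [this, if_pos hb]
      push_cast
      ring
    · have : PySem.Int.mod (row.getD n 0) 2 = 0 := by
        simp only [pvBitI, decide_eq_true_eq] at hb
        omega
      rw [this, if_neg hb]
      simp

theorem pvNmask_lt (n : Nat) (row : List Int) : pvNmask n row < 2^n := by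
  have := pvOfBits_lt ((List.range n).map (fun k => pvBitI (row.getD k 0)))
  simpa [pvNmask] using this

theorem pvNmask_testBit (n : Nat) (row : List Int) (k : Nat) :
    (pvNmask n row).testBit k = if k < n then pvBitI (row.getD k 0) else false := by
  rw [pvNmask, pvOfBits_testBit]
  by_cases h : k < n
  · rw [if_pos h, PySem.List.getD_map_range _ _ _ _ h]
  · rw [if_neg h, List.getD_eq_default]
    simp; omega

def pvXorSel : List Nat → List Bool → Nat
  | m :: ms, b :: bs => if b then m ^^^ pvXorSel ms bs else pvXorSel ms bs
  | _, _ => 0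

theorem pvXorSel_lt (ms : List Nat) (bs : List Bool) (n : Nat) (h : ∀ m ∈ ms, m < 2^n) :
    pvXorSel ms bs < 2^n := by
  induction ms generalizing bs with
  | nil => rw [pvXorSel.eq_def]; simpa using Nat.two_pow_pos n
  | cons m ms ih =>
    cases bs with
    | nil => rw [pvXorSel.eq_def]; simpa using Nat.two_pow_pos n
    | cons b bs =>
      rw [pvXorSel]
      have h1 := h m (by simp)
      have h2 := ih bs (fun x hx => h x (by simp [hx]))
      by_cases hb : b
      · rw [if_pos hb]; exact Nat.xor_lt_two_pow h1 h2
      · rw [if_neg hb]; exact h2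

-- span fold membership
theorem span_mem (n : Nat) (rows : List (List Int)) (acc : PySem.Set Int) (A : Nat → Prop)
    (hacc : ∀ x : Int, x ∈ acc ↔ ∃ u : Nat, A u ∧ x = (u : Int)) (t : Int) :
    (t ∈ rows.foldl
      (fun (span : PySem.Set Int) row =>
        let m := pvMask n row
        PySem.Set.union span (PySem.Set.ofList (span.map (fun s => PySem.Int.bxor s m)))) acc) ↔
    ∃ u : Nat, A u ∧ ∃ bs : List Bool, bs.length = rows.length ∧
      t = ((u ^^^ pvXorSel (rows.map (pvNmask n)) bs : Nat) : Int) := by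
  induction rows generalizing acc A with
  | nil =>
    simp only [List.foldl_nil, List.map_nil, List.length_nil]
    rw [hacc]
    constructor
    · rintro ⟨u, hu, rfl⟩
      exact ⟨u, hu, [], rfl, by rw [pvXorSel.eq_def]; simp⟩
    · rintro ⟨u, hu, bs, hbs, rfl⟩
      have hbs0 : bs = [] := List.length_eq_zero_iff.mp hbs
      subst hbs0
      exact ⟨u, hu, by rw [pvXorSel.eq_def]; simp⟩
  | cons r rows ih =>
    simp only [List.foldl_cons]
    rw [ih _ (fun u => A u ∨ ∃ u0, A u0 ∧ u = u0 ^^^ pvNmask n r)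
        (by
          intro x
          rw [PySem.Set.mem_union, PySem.Set.mem_ofList, List.mem_map]
          constructor
          · rintro (hx | ⟨s, hs, rfl⟩)
            · obtain ⟨u, hu, rfl⟩ := (hacc x).mp hx
              exact ⟨u, Or.inl hu, rfl⟩
            · obtain ⟨u, hu, rfl⟩ := (hacc s).mp hs
              refine ⟨u ^^^ pvNmask n r, Or.inr ⟨u, hu, rfl⟩, ?_⟩
              rw [pvMask_eq]
              simp [PySem.Int.bxor_natCast]
          · rintro ⟨u, (hu | ⟨u0, hu0, rfl⟩), rfl⟩
            · exact Or.inl ((hacc _).mpr ⟨u, hu, rfl⟩)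
            · refine Or.inr ⟨(u0 : Int), (hacc _).mpr ⟨u0, hu0, rfl⟩, ?_⟩
              rw [pvMask_eq]
              simp [PySem.Int.bxor_natCast])]
    constructor
    · rintro ⟨u, (hu | ⟨u0, hu0, rfl⟩), bs, hbs, rfl⟩
      · refine ⟨u, hu, false :: bs, by simp [hbs], ?_⟩
        simp only [List.map_cons, pvXorSel, if_neg (by simp : ¬ (false = true))]
      · refine ⟨u0, hu0, true :: bs, by simp [hbs], ?_⟩
        simp [pvXorSel, Nat.xor_assoc]
    · rintro ⟨u, hu, bs, hbs, rfl⟩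
      cases bs with
      | nil => simp at hbs
      | cons b bs =>
        cases b
        · refine ⟨u, Or.inl hu, bs, by simpa using hbs, ?_⟩
          simp only [List.map_cons, pvXorSel, if_neg (by simp : ¬ (false = true))]
        · refine ⟨u ^^^ pvNmask n r, Or.inr ⟨u, hu, rfl⟩, bs, by simpa using hbs, ?_⟩
          simp [pvXorSel, Nat.xor_assoc]

def pvCoeffOf (bs : List Bool) : List Int := bs.map (fun b => if b then (1:Int) else 0)

theorem mem_pvProd01 (s : Nat) (c : List Int) :
    c ∈ pvProd01 s ↔ c.length = s ∧ ∀ x ∈ c, x = 0 ∨ x = 1 := by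
  induction s generalizing c with
  | zero =>
    simp only [pvProd01, List.mem_singleton]
    constructor
    · rintro rfl; simp
    · rintro ⟨hl, _⟩; exact List.length_eq_zero_iff.mp hl
  | succ s ih =>
    simp only [pvProd01, List.mem_flatMap, List.mem_map]
    constructor
    · rintro ⟨x, hx, c', hc', rfl⟩
      obtain ⟨hl, hall⟩ := ih c' |>.mp hc'
      refine ⟨by simp [hl], ?_⟩
      intro y hy
      rcases List.mem_cons.mp hy with rfl | hy2
      · simpa using hx
      · exact hall y hy2
    · rintro ⟨hl, hall⟩
      cases c with
      | nil => simp at hl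
      | cons x c' =>
        refine ⟨x, by simpa using hall x (by simp), c', ?_, rfl⟩
        exact (ih c').mpr ⟨by simpa using hl, fun y hy => hall y (by simp [hy])⟩

theorem pvCoeffOf_mem (bs : List Bool) : pvCoeffOf bs ∈ pvProd01 bs.length := by
  rw [mem_pvProd01]
  constructor
  · simp [pvCoeffOf]
  · intro x hx
    simp only [pvCoeffOf, List.mem_map] at hx
    obtain ⟨b, _, rfl⟩ := hx
    cases b <;> simp

theorem eq_pvCoeffOf (s : Nat) (c : List Int) (hc : c ∈ pvProd01 s) :
    c = pvCoeffOf (c.map (fun x => x == 1)) := by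
  obtain ⟨_, hall⟩ := (mem_pvProd01 s c).mp hc
  rw [pvCoeffOf, List.map_map]
  conv_lhs => rw [← List.map_id c]
  apply List.map_congr_left
  intro x hx
  rcases hall x hx with rfl | rfl <;> simp

def pvScoeff (rows : List (List Int)) (coeff : List Int) (k : Nat) : Int :=
  (((rows.zip coeff)).map (fun p => p.1.getD k 0 * p.2)).sum

theorem pvBitI_add (a b : Int) : pvBitI (a + b) = (pvBitI a).xor (pvBitI b) := by
  simp only [pvBitI, PySem.Int.mod_eq_emod_of_pos (show (0:Int) < 2 by omega)]
  have ha := Int.emod_emod_of_dvd a (dvd_refl 2)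
  have h1 : (a + b) % 2 = (a % 2 + b % 2) % 2 := by omega
  have h2 : 0 ≤ a % 2 ∧ a % 2 < 2 := ⟨Int.emod_nonneg a (by omega), Int.emod_lt_of_pos a (by omega)⟩
  have h3 : 0 ≤ b % 2 ∧ b % 2 < 2 := ⟨Int.emod_nonneg b (by omega), Int.emod_lt_of_pos b (by omega)⟩
  rcases (show a % 2 = 0 ∨ a % 2 = 1 by omega) with h4 | h4 <;>
    rcases (show b % 2 = 0 ∨ b % 2 = 1 by omega) with h5 | h5 <;>
      simp [h4, h5] <;> omega

theorem pvXorSel_testBit (n : Nat) (rows : List (List Int)) (bs : List Bool)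
    (hlen : bs.length = rows.length) (k : Nat) :
    (pvXorSel (rows.map (pvNmask n)) bs).testBit k
      = (decide (k < n) && pvBitI (pvScoeff rows (pvCoeffOf bs) k)) := by
  induction rows generalizing bs with
  | nil =>
    have : bs = [] := List.length_eq_zero_iff.mp (by simpa using hlen)
    subst this
    rw [pvXorSel.eq_def]
    simp [pvScoeff, pvCoeffOf, pvBitI]
  | cons r rows ih =>
    cases bs with
    | nil => simp at hlen
    | cons b bs =>
      have hlen2 : bs.length = rows.length := by simpa using hlen
      have hS : pvScoeff (r :: rows) (pvCoeffOf (b :: bs)) k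
          = r.getD k 0 * (if b then (1:Int) else 0) + pvScoeff rows (pvCoeffOf bs) k := by
        simp [pvScoeff, pvCoeffOf]
      rw [List.map_cons, pvXorSel, hS]
      cases b
      · simp only [if_neg (by simp : ¬ (false = true)), Bool.if_false_right]
        rw [ih bs hlen2]
        simp
      · have ht : (if (true = true) then pvNmask n r ^^^ pvXorSel (List.map (pvNmask n) rows) bs
            else pvXorSel (List.map (pvNmask n) rows) bs)
            = pvNmask n r ^^^ pvXorSel (List.map (pvNmask n) rows) bs := by simp
        rw [ht, Nat.testBit_xor, ih bs hlen2, pvNmask_testBit, pvBitI_add]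
        by_cases hk : k < n <;> simp [hk]

def pvCCP (N : Nat) (P : Nat → Bool) (b e : Nat) : Prop :=
  ∃ m, m < 2^N ∧ P m = true ∧ (∀ j, j < N → j < b → (m.testBit j = true → e.testBit j = true)) ∧
    (∀ j, j < N → b ≤ j → m.testBit j = e.testBit j)

def pvCC (N : Nat) (P : Nat → Bool) (b e : Nat) : Bool :=
  (List.range (2^N)).any (fun m => P m &&
    ((List.range N).all (fun j =>
      if j < b then (!(m.testBit j) || e.testBit j) else (m.testBit j == e.testBit j))))

theorem pvCC_iff (N : Nat) (P : Nat → Bool) (b e : Nat) :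
    pvCC N P b e = true ↔ pvCCP N P b e := by
  simp only [pvCC, pvCCP, List.any_eq_true, List.mem_range, Bool.and_eq_true, List.all_eq_true]
  constructor
  · rintro ⟨m, hm, hP, hall⟩
    refine ⟨m, hm, hP, ?_, ?_⟩
    · intro j hj hjb hbit
      have := hall j (by simpa using hj)
      rw [if_pos hjb] at this
      simpa [hbit] using this
    · intro j hj hjb
      have := hall j (by simpa using hj)
      rw [if_neg (by omega)] at this
      simpa using this
  · rintro ⟨m, hm, hP, hsub, heq⟩
    refine ⟨m, hm, hP, ?_⟩
    intro j hj
    replace hj : j < N := by simpa using hj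
    by_cases hjb : j < b
    · rw [if_pos hjb]
      cases htb : m.testBit j
      · simp
      · simpa using hsub j hj hjb htb
    · rw [if_neg hjb]
      simpa using heq j hj (by omega)

theorem pvCC_zero (N : Nat) (P : Nat → Bool) (e : Nat) (he : e < 2^N) :
    pvCCP N P 0 e ↔ P e = true := by
  unfold pvCCP
  constructor
  · rintro ⟨m, hlt, hP, _, heq⟩
    have : m = e := by
      apply Nat.eq_of_testBit_eq
      intro j
      by_cases hj : j < N
      · exact heq j hj (by omega)
      · rw [testBit_false_of_lt hlt (by omega), testBit_false_of_lt he (by omega)]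
    rwa [this] at hP
  · intro hP
    exact ⟨e, he, hP, fun j _ hj => by omega, fun j _ _ => rfl⟩

theorem xor_pow_testBit (e b j : Nat) :
    (e ^^^ 2^b).testBit j = ((e.testBit j).xor (decide (b = j))) := by
  rw [Nat.testBit_xor, Nat.testBit_two_pow]

theorem pvCC_succ (N : Nat) (P : Nat → Bool) (b e : Nat) (he : e < 2^N) (hb : b < N) :
    pvCCP N P (b+1) e ↔
      (if e.testBit b then (pvCCP N P b e ∨ pvCCP N P b (e ^^^ 2^b)) else pvCCP N P b e) := by
  unfold pvCCP
  by_cases hteb : e.testBit b = true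
  · rw [if_pos hteb]
    constructor
    · rintro ⟨m, hlt, hP, hsub, heq⟩
      by_cases hmb : m.testBit b = true
      · left
        refine ⟨m, hlt, hP, fun j hj hjb => hsub j hj (by omega), fun j hj hjb => ?_⟩
        rcases Nat.eq_or_lt_of_le hjb with rfl | hjb2
        · rw [hmb, hteb]
        · exact heq j hj (by omega)
      · right
        refine ⟨m, hlt, hP, fun j hj hjb => ?_, fun j hj hjb => ?_⟩
        · rw [xor_pow_testBit, decide_eq_false (by omega : ¬ b = j)]
          intro hm
          simp only [Bool.xor_false]
          exact hsub j hj (by omega) hm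
        · rcases Nat.eq_or_lt_of_le hjb with rfl | hjb2
          · rw [xor_pow_testBit, decide_eq_true (rfl : b = b)]
            simp only [Bool.not_eq_true] at hmb
            rw [hmb, hteb]
            rfl
          · rw [xor_pow_testBit, decide_eq_false (by omega : ¬ b = j), Bool.xor_false]
            exact heq j hj (by omega)
    · rintro (⟨m, hlt, hP, hsub, heq⟩ | ⟨m, hlt, hP, hsub, heq⟩)
      · refine ⟨m, hlt, hP, fun j hj hjb => ?_, fun j hj hjb => heq j hj (by omega)⟩
        rcases (by omega : j < b ∨ j = b) with hjb2 | rfl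
        · exact hsub j hj hjb2
        · intro _; exact hteb
      · refine ⟨m, hlt, hP, fun j hj hjb => ?_, fun j hj hjb => ?_⟩
        · rcases (by omega : j < b ∨ j = b) with hjb2 | rfl
          · intro hm
            have := hsub j hj hjb2 hm
            rw [xor_pow_testBit, decide_eq_false (by omega : ¬ b = j), Bool.xor_false] at this
            exact this
          · intro _; exact hteb
        · have := heq j hj (by omega)
          rw [xor_pow_testBit, decide_eq_false (by omega : ¬ b = j), Bool.xor_false] at this
          exact this
  · rw [if_neg hteb]
    simp only [Bool.not_eq_true] at hteb
    constructor
    · rintro ⟨m, hlt, hP, hsub, heq⟩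
      refine ⟨m, hlt, hP, fun j hj hjb => hsub j hj (by omega), fun j hj hjb => ?_⟩
      rcases Nat.eq_or_lt_of_le hjb with rfl | hjb2
      · rw [hteb]
        by_cases hmb : m.testBit b = true
        · have := hsub b hj (by omega) hmb
          rw [this] at hteb; exact absurd hteb (by simp)
        · simpa using hmb
      · exact heq j hj (by omega)
    · rintro ⟨m, hlt, hP, hsub, heq⟩
      refine ⟨m, hlt, hP, fun j hj hjb => ?_, fun j hj hjb => heq j hj (by omega)⟩
      rcases (by omega : j < b ∨ j = b) with hjb2 | rfl
      · exact hsub j hj hjb2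
      · intro hm
        rw [heq j hj (by omega)] at hm
        exact hm

theorem max_ite_one (p q : Prop) [Decidable p] [Decidable q] :
    max (if p then (1:Int) else 0) (if q then (1:Int) else 0) = if p ∨ q then (1:Int) else 0 := by
  split_ifs <;> simp_all <;> omega

theorem sos_fold (N : Nat) (P : Nat → Bool) (b : Nat) (hb : b ≤ N) :
    (List.range b).foldl
      (fun f c => (List.range (2^N)).map (fun e =>
        if e &&& (1 <<< c) ≠ 0 then max (f.getD e (0:Int)) (f.getD (e ^^^ (1 <<< c)) (0:Int)) else f.getD e (0:Int)))
      ((List.range (2^N)).map (fun e => if P e then (1:Int) else 0))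
    = (List.range (2^N)).map (fun e => if pvCC N P b e then (1:Int) else 0) := by
  induction b with
  | zero =>
    simp only [List.range_zero, List.foldl_nil]
    apply List.map_congr_left
    intro e he
    simp only [List.mem_range] at he
    rw [if_congr (Iff.symm ((pvCC_iff N P 0 e).trans (pvCC_zero N P e he))) rfl rfl]
  | succ b ih =>
    rw [List.range_succ, List.foldl_append, ih (by omega), List.foldl_cons, List.foldl_nil]
    apply List.map_congr_left
    intro e he
    simp only [List.mem_range] at he
    have hblt : b < N := by omega
    have hpow : (2:Nat)^b < 2^N := Nat.pow_lt_pow_right (by omega) hblt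
    have hxlt : e ^^^ 2^b < 2^N := Nat.xor_lt_two_pow he hpow
    have hand : (e &&& (1 <<< b) ≠ 0) ↔ e.testBit b = true := by
      rw [Nat.one_shiftLeft, Nat.and_two_pow]
      constructor
      · intro h
        by_contra hc
        simp only [Bool.not_eq_true] at hc
        rw [hc] at h
        simp at h
      · intro h
        rw [h]
        simp
    rw [PySem.List.getD_map_range _ _ _ _ he]
    by_cases hcond : e &&& (1 <<< b) ≠ 0
    · rw [if_pos hcond, Nat.one_shiftLeft, PySem.List.getD_map_range _ _ _ _ hxlt, max_ite_one]
      rw [if_congr (Iff.symm ((pvCC_iff N P (b+1) e).trans ((pvCC_succ N P b e he hblt).trans (by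
        rw [if_pos ((hand.mp hcond))]
        exact or_congr (pvCC_iff N P b e).symm (pvCC_iff N P b (e ^^^ 2^b)).symm)))) rfl rfl]
    · rw [if_neg hcond]
      have hteb : e.testBit b = false := by
        by_contra hc
        simp only [Bool.not_eq_false] at hc
        exact hcond (hand.mpr hc)
      rw [if_congr (Iff.symm ((pvCC_iff N P (b+1) e).trans ((pvCC_succ N P b e he hblt).trans (by
        rw [if_neg (by simp [hteb])]
        exact (pvCC_iff N P b e).symm)))) rfl rfl]

theorem pvCC_final (N : Nat) (P : Nat → Bool) (e : Nat) (he : e < 2^N) :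
    pvCCP N P N e ↔ ∃ m, P m = true ∧ m < 2^N ∧ ∀ j, m.testBit j = true → e.testBit j = true := by
  unfold pvCCP
  constructor
  · rintro ⟨m, hlt, hP, hsub, _⟩
    refine ⟨m, hP, hlt, fun j hj => ?_⟩
    by_cases hjN : j < N
    · exact hsub j hjN hjN hj
    · rw [testBit_false_of_lt hlt (by omega)] at hj
      exact absurd hj (by simp)
  · rintro ⟨m, hP, hlt, hsub⟩
    refine ⟨m, hlt, hP, fun j _ _ => hsub j, fun j hj hjN => ?_⟩
    omega

-- ---------- proof-side names for B's intermediate values ----------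
def pvSpanSet (xs : List (List Int)) (n : Nat) : PySem.Set Int :=
  xs.foldl
    (fun (span : PySem.Set Int) row =>
      let m := pvMask n row
      PySem.Set.union span (PySem.Set.ofList (span.map (fun s => PySem.Int.bxor s m))))
    (PySem.Set.ofList [0])

def pvMarked (xs : List (List Int)) (xl : List Int) (n : Nat) : PySem.Set Int :=
  PySem.Set.ofList ((pvSpanSet xs n).map (fun s => PySem.Int.bxor s (pvMask n xl)))

def pvPB (xs : List (List Int)) (xl : List Int) (n : Nat) : Nat → Bool :=
  fun m => PySem.Set.contains (pvMarked xs xl n) (m : Int)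

theorem B_unfold (xs : List (List Int)) (xl : List Int) :
    erasure_color_alt xs xl =
      (List.range ((xs.headI).length + 1)).map (fun w =>
        (((List.range (2^(xs.headI).length)).filter (fun e => pvPopcount e == w)).map
          (fun e => ((List.range (xs.headI).length).foldl
            (fun f b => (List.range (2^(xs.headI).length)).map (fun e =>
              if e &&& (1 <<< b) ≠ 0 then max (f.getD e (0:Int)) (f.getD (e ^^^ (1 <<< b)) (0:Int)) else f.getD e (0:Int)))
            ((List.range (2^(xs.headI).length)).map (fun e => if pvPB xs xl (xs.headI).length e then (1:Int) else 0))).getD e (0:Int))).sum) := by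
  simp only [erasure_color_alt, pvPB, pvMarked, pvSpanSet]
  rfl

theorem pvPB_iff (xs : List (List Int)) (xl : List Int) (n : Nat) (m : Nat) :
    pvPB xs xl n m = true ↔
      ∃ bs : List Bool, bs.length = xs.length ∧
        m = pvXorSel (xs.map (pvNmask n)) bs ^^^ pvNmask n xl := by
  rw [pvPB, PySem.Set.contains_iff, pvMarked, PySem.Set.mem_ofList, List.mem_map]
  constructor
  · rintro ⟨t, ht, heq⟩
    rw [pvSpanSet] at ht
    obtain ⟨u, hu, bs, hbs, rfl⟩ := (span_mem n xs (PySem.Set.ofList [0]) (fun u => u = 0)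
      (by
        intro x
        rw [PySem.Set.mem_ofList]
        constructor
        · intro hx
          refine ⟨0, rfl, by simpa using hx⟩
        · rintro ⟨u, rfl, rfl⟩
          simp) t).mp ht
    subst hu
    rw [pvMask_eq] at heq
    rw [PySem.Int.bxor_natCast] at heq
    refine ⟨bs, hbs, ?_⟩
    have := Int.natCast_inj.mp heq.symm
    rw [this]
    simp [Nat.zero_xor]
  · rintro ⟨bs, hbs, rfl⟩
    refine ⟨((pvXorSel (xs.map (pvNmask n)) bs : Nat) : Int), ?_, ?_⟩
    · rw [pvSpanSet]
      apply (span_mem n xs (PySem.Set.ofList [0]) (fun u => u = 0)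
        (by
          intro x
          rw [PySem.Set.mem_ofList]
          constructor
          · intro hx
            refine ⟨0, rfl, by simpa using hx⟩
          · rintro ⟨u, rfl, rfl⟩
            simp) _).mpr
      exact ⟨0, rfl, bs, hbs, by simp [Nat.zero_xor]⟩
    · rw [pvMask_eq, PySem.Int.bxor_natCast]

theorem pvBitI_mod (a : Int) : pvBitI (PySem.Int.mod a 2) = pvBitI a := by
  simp only [pvBitI]
  rw [PySem.Int.mod_eq_emod_of_pos (by omega), PySem.Int.mod_eq_emod_of_pos (by omega)]
  simp [Int.emod_emod_of_dvd]

theorem bit_iff (xs : List (List Int)) (xl : List Int) (n : Nat) (bs : List Bool)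
    (hlen : bs.length = xs.length) (k : Nat) (hk : k < n) :
    ((pvXorSel (xs.map (pvNmask n)) bs ^^^ pvNmask n xl).testBit k = true)
      ↔ (PySem.Int.mod (PySem.Int.mod (pvScoeff xs (pvCoeffOf bs) k) 2 + xl.getD k 0) 2 = 1) := by
  rw [Nat.testBit_xor, pvXorSel_testBit n xs bs hlen k, pvNmask_testBit, if_pos hk,
    decide_eq_true hk, Bool.true_and]
  have h1 : pvBitI (PySem.Int.mod (pvScoeff xs (pvCoeffOf bs) k) 2 + xl.getD k 0)
      = (pvBitI (pvScoeff xs (pvCoeffOf bs) k)).xor (pvBitI (xl.getD k 0)) := by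
    rw [pvBitI_add, pvBitI_mod]
  rw [← h1]
  simp [pvBitI]

theorem mmask_lt (xs : List (List Int)) (xl : List Int) (n : Nat) (bs : List Bool) :
    pvXorSel (xs.map (pvNmask n)) bs ^^^ pvNmask n xl < 2^n := by
  apply Nat.xor_lt_two_pow _ (pvNmask_lt n xl)
  apply pvXorSel_lt
  intro m hm
  simp only [List.mem_map] at hm
  obtain ⟨r, _, rfl⟩ := hm
  exact pvNmask_lt n r

theorem key_any (xs : List (List Int)) (xl : List Int) (n i : Nat) :
    ((pvProd01 xs.length).any (fun coeff => pvBreakvarx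
       ((List.range n).map (fun k => PySem.Int.mod (PySem.Int.mod (pvScoeff xs coeff k) 2 + xl.getD k 0) 2))
       (pvPatX n i) n == 0))
    = pvCC n (pvPB xs xl n) n (pvRev n i) := by
  rw [Bool.eq_iff_iff]
  simp only [List.any_eq_true, beq_iff_eq]
  rw [pvCC_iff, pvCC_final n _ _ (pvRev_lt n i)]
  constructor
  · rintro ⟨coeff, hcoeff, hfit⟩
    obtain ⟨hclen, _⟩ := (mem_pvProd01 _ _).mp hcoeff
    have hcoeq := eq_pvCoeffOf _ coeff hcoeff
    set bs := coeff.map (fun x => x == 1) with hbs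
    have hblen : bs.length = xs.length := by simp [hbs, hclen]
    refine ⟨pvXorSel (xs.map (pvNmask n)) bs ^^^ pvNmask n xl,
      (pvPB_iff xs xl n _).mpr ⟨bs, hblen, rfl⟩, mmask_lt xs xl n bs, ?_⟩
    intro j hj
    by_cases hjn : j < n
    · rw [pvRev_testBit, if_pos hjn]
      have hfit' := (pvBreakvarx_eq_zero _ _ n).mp hfit j hjn
      rw [PySem.List.getD_map_range _ _ _ _ hjn] at hfit'
      have hmod := (bit_iff xs xl n bs hblen j hjn).mp hj
      rw [← hcoeq] at hmod
      have hpat := hfit' hmod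
      rw [pvPatX_getD n i j hjn] at hpat
      by_contra hc
      simp only [Bool.not_eq_true] at hc
      rw [hc] at hpat
      simp at hpat
    · rw [testBit_false_of_lt (mmask_lt xs xl n bs) (by omega)] at hj
      exact absurd hj (by simp)
  · rintro ⟨m, hPm, hmlt, hsub⟩
    obtain ⟨bs, hblen, rfl⟩ := (pvPB_iff xs xl n m).mp hPm
    refine ⟨pvCoeffOf bs, by rw [← hblen]; exact pvCoeffOf_mem bs, ?_⟩
    rw [pvBreakvarx_eq_zero]
    intro k hk hL
    rw [PySem.List.getD_map_range _ _ _ _ hk] at hL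
    have hbit : (pvXorSel (xs.map (pvNmask n)) bs ^^^ pvNmask n xl).testBit k = true :=
      (bit_iff xs xl n bs hblen k hk).mpr hL
    have := hsub k hbit
    rw [pvRev_testBit, if_pos hk] at this
    rw [pvPatX_getD n i k hk, if_pos this]

theorem pvProd01_ne_nil (s : Nat) : pvProd01 s ≠ [] := by
  induction s with
  | zero => simp [pvProd01]
  | succ s ih =>
    simp only [pvProd01]
    simp [List.flatMap_eq_nil_iff, ih]

theorem min_len_ge (xs : List (List Int)) (n : Nat) (hne : xs ≠ [])
    (hrows : ∀ r ∈ xs, n ≤ r.length) :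
    n ≤ ((xs.map List.length).min?).getD 0 := by
  cases hmin : (xs.map List.length).min? with
  | none =>
    exact absurd (List.min?_eq_none_iff.mp hmin) (by simp [hne])
  | some a =>
    have ha := List.min?_mem hmin
    simp only [List.mem_map] at ha
    obtain ⟨r, hr, rfl⟩ := ha
    simpa using hrows r hr

theorem xlog_eq (xs : List (List Int)) (xl : List Int) (hne : xs ≠ [])
    (hrows : ∀ r ∈ xs, (xs.headI).length ≤ r.length) :
    pvCreateLogicals xs xl = (pvProd01 xs.length).map (fun coeff =>
      (List.range (xs.headI).length).map (fun k =>
        PySem.Int.mod (PySem.Int.mod (pvScoeff xs coeff k) 2 + xl.getD k 0) 2)) := by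
  rw [pvCreateLogicals, pvSpanGen, if_neg hne]
  rw [if_neg (by simp [pvProd01_ne_nil])]
  rw [List.map_map]
  apply List.map_congr_left
  intro coeff hcoeff
  simp only [Function.comp]
  rw [List.length_map, List.length_range]
  apply List.map_congr_left
  intro k hk
  simp only [List.mem_range] at hk
  rw [PySem.List.getD_map_range _ _ _ _ hk]
  congr 2
  -- the column sum is pvScoeff
  have hmin : k < ((xs.map List.length).min?).getD 0 :=
    lt_of_lt_of_le hk (min_len_ge xs (xs.headI).length hne hrows)
  rw [pvTranspose]
  rw [PySem.List.getD_map_range _ _ _ _ hmin]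
  rw [List.zip_map_left, List.map_map]
  rfl

theorem getD_replicate_zero (n w : Nat) (hw : w < n) :
    (List.replicate n (0:Int)).getD w 0 = 0 := by
  rw [List.getD_eq_getElem?_getD, List.getElem?_replicate, if_pos hw]
  rfl

theorem foldl_loopJ (ls : List (List Int)) (n : Nat) (errs : List (List Int)) :
    List.foldl (fun acc e => pvLoopJ ls e n acc) [] errs
      = errs.filter (fun e => ls.any (fun L => pvBreakvarx L e n == 0)) := by
  rw [PySem.List.foldl_congr_mem errs _
    (fun acc e => if ls.any (fun L => pvBreakvarx L e n == 0) then acc ++ [e] else acc) []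
    (fun acc x _ => pvLoopJ_eq ls x n acc)]
  rw [PySem.List.foldl_append_if_eq_filter, List.nil_append]

-- ===== VERDICT (by name: the statement is the Claim_ definition above) =====
theorem erasure_color_spec : Claim_equal_erasure_color := by
  intro xs xl hdom hpre
  obtain ⟨hne, hrows, hlog⟩ := hpre
  show erasure_color xs xl = erasure_color_alt xs xl
  have hA : erasure_color xs xl =
      ((pvPatterns (xs.headI).length).foldl
        (fun acc e => pvLoopJ (pvCreateLogicals xs xl) e (xs.headI).length acc) []).foldl
        (fun d e => d.set (e.sum).toNat (d.getD (e.sum).toNat 0 + 1))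
        (List.replicate ((xs.headI).length + 1) (0:Int)) := rfl
  rw [hA, xlog_eq xs xl hne hrows, pvPatterns_eq, foldl_loopJ]
  -- the dummy[sum] += 1 loop is a per-weight count
  rw [incr_fold _ _ ((xs.headI).length + 1) (by simp)
    (by
      intro e he
      rw [List.mem_filter] at he
      obtain ⟨i, _, rfl⟩ := List.mem_map.mp he.1
      exact pvPatX_sum_le _ _)]
  -- B side
  rw [B_unfold, sos_fold (xs.headI).length (pvPB xs xl (xs.headI).length) (xs.headI).length le_rfl]
  apply List.map_congr_left
  intro w hw
  simp only [List.mem_range] at hw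
  rw [getD_replicate_zero _ _ hw, zero_add]
  -- B sum to count
  rw [List.map_congr_left (g := fun e =>
      if pvCC (xs.headI).length (pvPB xs xl (xs.headI).length) (xs.headI).length e then (1:Int) else 0)
    (by
      intro e he
      rw [List.mem_filter, List.mem_range] at he
      exact PySem.List.getD_map_range _ _ _ _ he.1)]
  rw [PySem.List.sum_map_ite_one_zero
    (fun e => pvCC (xs.headI).length (pvPB xs xl (xs.headI).length) (xs.headI).length e) _]
  rw [List.countP_filter, List.countP_map, List.countP_filter]
  congr 1
  -- per-index equivalence and the bit-reversal bijection
  rw [List.countP_congr (q := fun i =>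
      (pvCC (xs.headI).length (pvPB xs xl (xs.headI).length) (xs.headI).length
          (pvRev (xs.headI).length i)
        && (pvPopcount (pvRev (xs.headI).length i) == w)))
    (by
      intro i _
      simp only [Function.comp_def]
      rw [pvPatX_sum, List.any_map]
      have hk := key_any xs xl (xs.headI).length i
      simp only [Function.comp_def] at hk ⊢
      rw [hk, Bool.and_comm])]
  exact countP_range_comp_rev (xs.headI).length
    (fun e => pvCC (xs.headI).length (pvPB xs xl (xs.headI).length) (xs.headI).length e
      && (pvPopcount e == w))
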